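-- pv_equiv track=rewrite | github.com/tqtifnypmb/ML | RNN/char_rnn.py | preprocess_sample
-- ===== SOURCE A (Python) =====
-- def preprocess_sample(sample):
--     duplicated = set()
--     unique = [x for x in sample if not (x in duplicated or duplicated.add(x))]
--
--     vocab_index = []
--     for c in sample:
--         idx = unique.index(c)
--         vocab_index.append(idx)
--
--     return vocab_index, unique
-- ===== SOURCE B (Python) =====
-- def preprocess_sample(sample):
--     unique = sorted(set(sample), key=sample.index)
--     pos = {c: i for i, c in enumerate(unique)}
--     vocab_index = [pos[c] for c in sample]
--     return vocab_index, unique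
-- ===== Notes on version B (the rewrite author's own statement) =====
-- stated objective: alternative
-- what changed: Instead of A's incremental filter-dedup followed by a per-char unique.index scan, B sorts the distinct characters by their first occurrence in the sample and translates the sample through a precomputed char-to-position dict.
import Mathlib
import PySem

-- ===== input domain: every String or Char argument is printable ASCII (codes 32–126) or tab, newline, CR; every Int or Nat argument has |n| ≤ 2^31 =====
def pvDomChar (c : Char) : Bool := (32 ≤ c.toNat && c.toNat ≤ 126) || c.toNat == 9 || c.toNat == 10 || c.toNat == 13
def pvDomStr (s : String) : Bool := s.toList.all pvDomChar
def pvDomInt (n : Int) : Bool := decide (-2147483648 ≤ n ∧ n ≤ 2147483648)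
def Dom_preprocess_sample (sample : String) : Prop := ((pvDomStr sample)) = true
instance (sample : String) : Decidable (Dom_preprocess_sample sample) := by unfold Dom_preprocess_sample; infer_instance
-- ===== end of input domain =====

-- B replaces A's incremental dedup-then-quadratic-index passes by sorting the distinct
-- characters by first occurrence and translating through a precomputed position table
-- (alternative decomposition, same return value; neither is claimed faster).

-- ===== PORT A =====
-- A: duplicated = set(); unique = [x for x in sample if not (x in duplicated or duplicated.add(x))]
-- then for c in sample: vocab_index.append(unique.index(c)).
-- unique.index(c) never raises (every char of sample occurs in unique), so the
-- port uses (index? …).getD 0 — exact on every input.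
def preprocess_sample (sample : String) : List Int × List String :=
  let st := sample.toList.foldl
    (fun (st : PySem.Set Char × List Char) x =>
      if PySem.Set.contains st.1 x then st else (PySem.Set.add st.1 x, st.2 ++ [x]))
    (PySem.Set.empty, [])
  let unique := st.2
  let vocab_index := sample.toList.foldl
    (fun acc c => acc ++ [((PySem.List.index? unique c).getD 0 : Int)]) []
  (vocab_index, unique.map (fun c => String.ofList [c]))

-- ===== PORT B =====
-- B: unique = sorted(set(sample), key=sample.index); pos = {c: i for i, c in enumerate(unique)};
-- vocab_index = [pos[c] for c in sample].
-- sample.index(c) never raises (c ∈ sample), so the key is (index? …).getD 0;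
-- pos[c] never raises (every char of sample is in unique), so it is Dict.getD c 0 — exact here.
def preprocess_sample_alt (sample : String) : List Int × List String :=
  let unique := PySem.List.sorted (PySem.Set.ofList sample.toList)
    (fun c => (PySem.List.index? sample.toList c).getD 0)
  let pos := (PySem.List.enumerate unique 0).foldl
    (fun (d : PySem.Dict Char Int) p => d.insert p.2 p.1) PySem.Dict.empty
  (sample.toList.map (fun c => pos.getD c 0), unique.map (fun c => String.ofList [c]))

-- ===== PRECONDITION & SPEC =====
def Spec_preprocess_sample (sample : String) (out : List Int × List String) : Prop := out = preprocess_sample_alt sample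
instance (sample : String) (out : List Int × List String) : Decidable (Spec_preprocess_sample sample out) := by unfold Spec_preprocess_sample; infer_instance

-- ===== CLAIM (what is proved, stated in full; the proofs are below) =====
def Claim_equal_preprocess_sample : Prop := ∀ (sample : String), Dom_preprocess_sample sample → Spec_preprocess_sample sample (preprocess_sample sample)

-- ===== LEMMAS AND PROOFS =====

-- A's first loop: starting from (s, s) it keeps both components equal and
-- computes exactly PySem.Set.update s chars.
theorem pvA_fold (chars : List Char) : ∀ (s : List Char),
    chars.foldl
      (fun (st : PySem.Set Char × List Char) x =>
        if PySem.Set.contains st.1 x then st else (PySem.Set.add st.1 x, st.2 ++ [x]))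
      (s, s)
    = (PySem.Set.update s chars, PySem.Set.update s chars) := by
  induction chars with
  | nil => intro s; simp [PySem.Set.update]
  | cons c rest ih =>
    intro s
    rw [List.foldl_cons, PySem.Set.update_cons]
    by_cases h : c ∈ s
    · have hb : PySem.Set.contains s c = true := by simp [PySem.Set.contains, h]
      have hadd : PySem.Set.add s c = s := by simp [PySem.Set.add, PySem.Set.contains, h]
      rw [if_pos hb, hadd]; exact ih s
    · have hb : ¬ PySem.Set.contains s c = true := by simp [PySem.Set.contains, h]
      have hadd : PySem.Set.add s c = s ++ [c] := by simp [PySem.Set.add, PySem.Set.contains, h]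
      rw [if_neg hb, hadd]; exact ih (s ++ [c])

-- A member's first-occurrence index is a genuine position, hence < length.
theorem pvIdx_lt {p : List Char} {a : Char} (ha : a ∈ p) :
    (PySem.List.index? p a).getD 0 < p.length := by
  have hs : (PySem.List.index? p a).isSome = true :=
    (PySem.List.index?_isSome_iff p a).mpr ha
  obtain ⟨k, hk⟩ := Option.isSome_iff_exists.mp hs
  obtain ⟨hlt, -, -⟩ := PySem.List.getElem_of_index?_eq_some hk
  rw [PySem.List.index?_eq_idxOf?] at hk
  simp [PySem.List.index?_eq_idxOf?, hk]
  exact hlt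

-- The ordered dedup of p is strictly increasing in first-occurrence index in p:
-- exactly the property that makes B's sort a no-op reordering.
theorem pvPairwise (p : List Char) :
    (PySem.Set.ofList p).Pairwise
      (fun a b => (PySem.List.index? p a).getD 0 < (PySem.List.index? p b).getD 0) := by
  induction p using List.reverseRecOn with
  | nil => simp [PySem.Set.ofList]
  | append_singleton p c ih =>
    have hof : PySem.Set.ofList (p ++ [c]) = PySem.Set.add (PySem.Set.ofList p) c := by
      rw [PySem.Set.ofList_eq_foldl, PySem.Set.ofList_eq_foldl, List.foldl_append]
      rfl
    by_cases h : c ∈ p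
    · have hadd : PySem.Set.add (PySem.Set.ofList p) c = PySem.Set.ofList p := by
        simp [PySem.Set.add, PySem.Set.contains, (PySem.Set.mem_ofList p c).mpr h]
      rw [hof, hadd]
      refine ih.imp_of_mem ?_
      intro a b hma hmb hab
      have ha : a ∈ p := (PySem.Set.mem_ofList p a).mp hma
      have hb : b ∈ p := (PySem.Set.mem_ofList p b).mp hmb
      rwa [PySem.List.index?_append_of_mem [c] ha, PySem.List.index?_append_of_mem [c] hb]
    · have hadd : PySem.Set.add (PySem.Set.ofList p) c = PySem.Set.ofList p ++ [c] := by
        have : c ∉ PySem.Set.ofList p := fun hc => h ((PySem.Set.mem_ofList p c).mp hc)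
        simp [PySem.Set.add, PySem.Set.contains, this]
      rw [hof, hadd, List.pairwise_append]
      refine ⟨?_, by simp, ?_⟩
      · refine ih.imp_of_mem ?_
        intro a b hma hmb hab
        have ha : a ∈ p := (PySem.Set.mem_ofList p a).mp hma
        have hb : b ∈ p := (PySem.Set.mem_ofList p b).mp hmb
        rwa [PySem.List.index?_append_of_mem [c] ha, PySem.List.index?_append_of_mem [c] hb]
      · intro a hma b hmb
        have ha : a ∈ p := (PySem.Set.mem_ofList p a).mp hma
        have hb : b = c := by simpa using hmb
        subst hb
        rw [PySem.List.index?_append_of_mem [b] ha,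
            PySem.List.index?_append_singleton_self p b h]
        simpa using pvIdx_lt ha
    
-- The enumerate-fold dict leaves keys it never inserts untouched.
theorem pvDict_skip (t : List Char) : ∀ (k : Int) (d : PySem.Dict Char Int) (c : Char),
    c ∉ t →
    ((PySem.List.enumerate t k).foldl
        (fun (d : PySem.Dict Char Int) p => d.insert p.2 p.1) d).getD c 0 = d.getD c 0 := by
  induction t with
  | nil => intro k d c _; simp [PySem.List.enumerate]
  | cons x rest ih =>
    intro k d c hc
    rw [PySem.List.enumerate_cons, List.foldl_cons]
    rw [ih (k + 1) _ c (fun h => hc (List.mem_cons_of_mem x h))]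
    rw [PySem.Dict.getD_insert]
    exact if_neg (fun h => hc (by rw [h]; exact List.mem_cons_self))

-- B's position dict stores, for each member of a duplicate-free u, k + its index in u.
theorem pvDict_enum (u : List Char) : ∀ (k : Int) (d : PySem.Dict Char Int),
    u.Nodup → ∀ c ∈ u,
    ((PySem.List.enumerate u k).foldl
        (fun (d : PySem.Dict Char Int) p => d.insert p.2 p.1) d).getD c 0
      = k + ((PySem.List.index? u c).getD 0 : Int) := by
  induction u with
  | nil => intro k d _ c hc; simp at hc
  | cons x rest ih =>
    intro k d hnd c hc
    rw [PySem.List.enumerate_cons, List.foldl_cons]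
    have hxr : x ∉ rest := (List.nodup_cons.mp hnd).1
    rcases List.mem_cons.mp hc with hcx | hcr
    · subst hcx
      rw [pvDict_skip rest (k + 1) _ c hxr, PySem.Dict.getD_insert, if_pos rfl,
          PySem.List.index?_cons_self]
      simp
    · have hne : x ≠ c := fun h => hxr (h ▸ hcr)
      rw [ih (k + 1) _ (List.nodup_cons.mp hnd).2 c hcr,
          PySem.List.index?_cons_of_ne rest hne]
      have hs : (PySem.List.index? rest c).isSome = true :=
        (PySem.List.index?_isSome_iff rest c).mpr hcr
      obtain ⟨j, hj⟩ := Option.isSome_iff_exists.mp hs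
      rw [hj]
      simp; omega

-- ===== VERDICT (by name: the statement is the Claim_ definition above) =====
theorem preprocess_sample_spec : Claim_equal_preprocess_sample := by
  intro sample _
  unfold Spec_preprocess_sample preprocess_sample preprocess_sample_alt
  -- A's dedup loop computes the ordered dedup
  have hA := pvA_fold sample.toList []
  have hupd : PySem.Set.update ([] : List Char) sample.toList
      = PySem.Set.ofList sample.toList := by
    rw [PySem.Set.ofList_eq_foldl]; rfl
  -- B's sort is the identity on that dedup
  have hsort : PySem.List.sorted (PySem.Set.ofList sample.toList)
      (fun c => (PySem.List.index? sample.toList c).getD 0)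
      = PySem.Set.ofList sample.toList :=
    PySem.List.sorted_eq_of_perm_of_pairwise_lt _ _ _ (List.Perm.refl _)
      (pvPairwise sample.toList)
  simp only [PySem.Set.empty, hA, hupd, hsort,
    PySem.List.foldl_append_singleton_eq_map, List.nil_append]
  refine Prod.ext ?_ rfl
  -- the two index lists agree char by char
  refine (List.map_congr_left ?_).symm
  intro c hc
  have hcu : c ∈ PySem.Set.ofList sample.toList :=
    (PySem.Set.mem_ofList sample.toList c).mpr hc
  rw [pvDict_enum _ 0 PySem.Dict.empty (PySem.Set.nodup_ofList sample.toList) c hcu]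
  simp
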